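-- pv_equiv track=rewrite | github.com/maiam6242/braille-printer | Text Side/translator.py | find_caps
-- ===== SOURCE A (Python) =====
-- def find_caps(segment):
--     '''
--     Finds every capital letter or word and inserts the corresponding characters in braille
--     Args: segment in English
--     Returns: The segment in English with a weird symbol (non-english)characters interspersed to denote capitalization
--     i.e. MAIA -> ||MAIA  or Maia -> | Maia
--
--     # >>> find_caps("HELLO")
--     # 'ηHELLO'
--     # >>> find_caps("Hello")
--     # 'ζHello'
--     # >>> find_caps("HI THERE I am wondering what You think About this wacky STRING")
--     # 'ηHI ηTHERE ζI am wondering what ζYou think ζAbout this wacky ηSTRING'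
--     # >>> find_caps("HEy! This is super COOOL! Cool cool CooL! HOw do you feeEEEEl?")
--     # 'ηHEy! ζThis is super ηCOOOL! ζCool cool ζCooζL! ηHOw do you feeηEEEEl?'
--     '''
--     #TODO: Whatever you make this letter(s) associate it with the cap letter and cap word things in the dictionary, so that the translate_text function can recognize everything
--     #TODO: Talk to real people about how capitals work so we can handle them better
--     # Notes:
--         #  For some reason setting newListSegment = listSegment causes them both to be changed when one is so adding list() fixes this for reasons I don't understand
--         # islower() and isupper() both return false if the string is a space so you need to use not isupper() which is super annoying but works
--
--     listSegment = list(segment)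
--     newListSegment = list(listSegment)
--     offset = 0
--     for i in range(len(listSegment)):
--         if i == 0:
--             lastupper = False # If there is no character before it tell it that the last character was not uppercase
--         else:
--             lastupper = listSegment[i-1].isupper()
--
--         if listSegment[i].isupper():
--             if i< len(listSegment) -1 and listSegment[i+1].isupper() and not lastupper:
--                 newListSegment.insert(i+offset, "η")
--                 offset+=1
--             else:
--                 if not lastupper:
--                     newListSegment.insert(i+offset, "ζ")
--                     offset+=1
--
--
--     outputString = ""
--     return outputString.join(newListSegment)
-- ===== SOURCE B (Python) =====
-- from itertools import groupby
--
-- def find_caps(segment):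
--     # Group into maximal runs of same-isupper chars; prefix upper runs with
--     # 'η' (run length >= 2) or 'ζ' (single capital). Single pass, no index math.
--     pieces = []
--     for isup, grp in groupby(segment, key=str.isupper):
--         run = ''.join(grp)
--         pieces.append((('η' if len(run) >= 2 else 'ζ') + run) if isup else run)
--     return ''.join(pieces)
-- ===== Notes on version B (the rewrite author's own statement) =====
-- stated objective: simpler
-- what changed: Replaces the index/offset insert-into-a-copy loop with a single groupby pass over maximal same-case runs, prefixing each uppercase run with eta (length>=2) or zeta; avoids O(n) list.insert shifts.
import Mathlib
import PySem

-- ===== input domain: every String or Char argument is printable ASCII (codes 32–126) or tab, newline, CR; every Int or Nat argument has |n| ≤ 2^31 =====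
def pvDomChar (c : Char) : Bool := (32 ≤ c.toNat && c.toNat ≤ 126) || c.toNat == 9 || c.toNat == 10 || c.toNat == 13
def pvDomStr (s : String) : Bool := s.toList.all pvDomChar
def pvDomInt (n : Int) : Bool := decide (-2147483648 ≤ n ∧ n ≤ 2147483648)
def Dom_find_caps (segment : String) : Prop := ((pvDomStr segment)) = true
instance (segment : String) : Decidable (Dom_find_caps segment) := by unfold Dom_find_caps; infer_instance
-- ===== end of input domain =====

-- B replaces A's index/offset insert-into-a-copy loop with a single pass over
-- maximal same-case runs (groupby), prefixing each uppercase run with 'η' or 'ζ': simpler decomposition.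


-- ===== PORT A =====
-- one iteration of A's for-loop (state: (newListSegment, offset), i the loop index)
def pvStepA (listSegment : List Char) (st : List Char × Int) (i : Int) : List Char × Int :=
  let lastupper : Bool :=
    if i = 0 then false
    else PySem.Chars.isupper (PySem.List.pyGetD listSegment (i - 1) ' ')
  if PySem.Chars.isupper (PySem.List.pyGetD listSegment i ' ') then
    if decide (i < (listSegment.length : Int) - 1) &&
       PySem.Chars.isupper (PySem.List.pyGetD listSegment (i + 1) ' ') && !lastupper then
      (PySem.List.insert st.1 (i + st.2) 'η', st.2 + 1)
    else
      if !lastupper then (PySem.List.insert st.1 (i + st.2) 'ζ', st.2 + 1)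
      else st
  else st

def find_caps (segment : String) : String :=
  let listSegment := segment.toList
  let newListSegment := listSegment
  let st := (PySem.List.pyRange 0 (listSegment.length : Int) 1).foldl
              (pvStepA listSegment) (newListSegment, 0)
  String.mk st.1

-- ===== PORT B =====
-- itertools.groupby(segment, key=str.isupper): maximal runs with their key
def pvRuns (l : List Char) : List (Bool × List Char) :=
  match l with
  | [] => []
  | c :: rest =>
    let k := PySem.Chars.isupper c
    let p := rest.span (fun d => PySem.Chars.isupper d == k)
    (k, c :: p.1) :: pvRuns p.2
termination_by l.length
decreasing_by
  simp only [List.span_eq_takeWhile_dropWhile]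
  exact Nat.lt_succ_of_le (List.length_dropWhile_le _ _)

def find_caps_alt (segment : String) : String :=
  let pieces := (pvRuns segment.toList).foldl
    (fun (acc : List (List Char)) g =>
      acc ++ [if g.1 then (if 2 ≤ g.2.length then 'η' :: g.2 else 'ζ' :: g.2) else g.2]) []
  String.mk pieces.flatten

-- ===== PRECONDITION & SPEC =====
def Spec_find_caps (segment : String) (out : String) : Prop := out = find_caps_alt segment
instance (segment : String) (out : String) : Decidable (Spec_find_caps segment out) := by unfold Spec_find_caps; infer_instance

-- ===== CLAIM (what is proved, stated in full; the proofs are below) =====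
def Claim_equal_find_caps : Prop := ∀ (segment : String), Dom_find_caps segment → Spec_find_caps segment (find_caps segment)

-- ===== LEMMAS AND PROOFS =====

-- is the next remaining character uppercase?
def pvNextUpper : List Char → Bool
  | [] => false
  | d :: _ => PySem.Chars.isupper d

-- reference recursion: marker decided from (was previous char upper?, current char, lookahead)
def pvMark (prev : Bool) : List Char → List Char
  | [] => []
  | c :: cs =>
    (if PySem.Chars.isupper c && !prev then
       (if pvNextUpper cs then ['η'] else ['ζ']) else [])
      ++ c :: pvMark (PySem.Chars.isupper c) cs

-- was the character before index k uppercase? (A's `lastupper`)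
def pvPrevAt (l : List Char) : Nat → Bool
  | 0 => false
  | k + 1 => PySem.Chars.isupper (l.getD k ' ')

theorem pvMark_true_run (run t : List Char) (h : ∀ d ∈ run, PySem.Chars.isupper d = true) :
    pvMark true (run ++ t) = run ++ pvMark true t := by
  induction run with
  | nil => rfl
  | cons c cs ih =>
    have hc := h c (by simp)
    simp [pvMark, hc, ih (fun d hd => h d (by simp [hd]))]

theorem pvMark_lower_cons (c : Char) (run t : List Char) (prev : Bool)
    (hc : PySem.Chars.isupper c = false)
    (h : ∀ d ∈ run, PySem.Chars.isupper d = false) :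
    pvMark prev (c :: (run ++ t)) = c :: run ++ pvMark false t := by
  induction run generalizing c prev with
  | nil => simp [pvMark, hc]
  | cons d ds ih =>
    have hd : PySem.Chars.isupper d = false := h d (by simp)
    have htail := ih d false hd (fun x hx => h x (List.mem_cons_of_mem _ hx))
    rw [pvMark, hc]
    simpa using htail

theorem pvNextUpper_dropWhile (rest : List Char) :
    pvNextUpper (rest.dropWhile (fun d => PySem.Chars.isupper d == true)) = false := by
  have h := List.head?_dropWhile_not (fun d => PySem.Chars.isupper d == true) rest
  cases hl : rest.dropWhile (fun d => PySem.Chars.isupper d == true) with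
  | nil => rfl
  | cons x xs =>
    rw [hl] at h
    simpa [pvNextUpper] using h

-- B's flattened run pieces equal pvMark (given prev = true only when the next char is not upper)
theorem runs_flat (n : Nat) (l : List Char) (hn : l.length ≤ n) (prev : Bool)
    (hinv : prev = true → pvNextUpper l = false) :
    ((pvRuns l).flatMap (fun g =>
      if g.1 then (if 2 ≤ g.2.length then 'η' :: g.2 else 'ζ' :: g.2) else g.2))
      = pvMark prev l := by
  induction n generalizing l prev with
  | zero =>
    have : l = [] := List.eq_nil_of_length_eq_zero (Nat.le_zero.mp hn)
    subst this; simp [pvRuns, pvMark]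
  | succ n ih =>
    cases l with
    | nil => simp [pvRuns, pvMark]
    | cons c rest =>
      rw [pvRuns]
      simp only [List.span_eq_takeWhile_dropWhile, List.flatMap_cons]
      cases hk : PySem.Chars.isupper c with
      | false =>
        have hrun : ∀ d ∈ rest.takeWhile (fun d => PySem.Chars.isupper d == false),
            PySem.Chars.isupper d = false := by
          intro d hd
          simpa using List.mem_takeWhile_imp hd
        have hlen : (rest.dropWhile (fun d => PySem.Chars.isupper d == false)).length ≤ n := by
          have := List.length_dropWhile_le (fun d => PySem.Chars.isupper d == false) rest
          simp at hn; omega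
        have hrec := ih (rest.dropWhile (fun d => PySem.Chars.isupper d == false)) hlen false
          (by simp)
        have hsplit : c :: rest =
            c :: (rest.takeWhile (fun d => PySem.Chars.isupper d == false) ++
                  rest.dropWhile (fun d => PySem.Chars.isupper d == false)) := by
          rw [List.takeWhile_append_dropWhile]
        rw [hsplit, pvMark_lower_cons c _ _ prev hk hrun, hrec]
        simp
      | true =>
        have hprev : prev = false := by
          cases hp : prev with
          | false => rfl
          | true =>
            have := hinv hp
            simp [pvNextUpper, hk] at this
        have hrun : ∀ d ∈ rest.takeWhile (fun d => PySem.Chars.isupper d == true),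
            PySem.Chars.isupper d = true := by
          intro d hd
          simpa using List.mem_takeWhile_imp hd
        have hlen : (rest.dropWhile (fun d => PySem.Chars.isupper d == true)).length ≤ n := by
          have := List.length_dropWhile_le (fun d => PySem.Chars.isupper d == true) rest
          simp at hn; omega
        have hrec := ih (rest.dropWhile (fun d => PySem.Chars.isupper d == true)) hlen true
          (fun _ => pvNextUpper_dropWhile rest)
        have hsplit : c :: rest =
            c :: (rest.takeWhile (fun d => PySem.Chars.isupper d == true) ++
                  rest.dropWhile (fun d => PySem.Chars.isupper d == true)) := by
          rw [List.takeWhile_append_dropWhile]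
        rw [hsplit, pvMark, hk, hprev]
        rw [pvMark_true_run _ _ hrun, hrec]
        cases hr : rest.takeWhile (fun d => PySem.Chars.isupper d == true) with
        | nil =>
          have h0 : pvNextUpper (rest.dropWhile (fun d => PySem.Chars.isupper d))
              = false := by simpa using pvNextUpper_dropWhile rest
          simp [h0]
        | cons d ds =>
          have hd : PySem.Chars.isupper d = true := hrun d (by rw [hr]; simp)
          simp [pvNextUpper, hd]

-- A's loop from index k, with the processed prefix in acc, computes pvMark on the suffix
theorem loopA (l : List Char) : ∀ (m k : Nat) (acc : List Char),
    m = l.length - k → k ≤ l.length →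
    ((PySem.List.pyRange (k : Int) (l.length : Int) 1).foldl (pvStepA l)
        (acc ++ l.drop k, (acc.length : Int) - (k : Int))).1
      = acc ++ pvMark (pvPrevAt l k) (l.drop k) := by
  intro m
  induction m with
  | zero =>
    intro k acc hm hk
    have hkn : k = l.length := by omega
    subst hkn
    rw [PySem.List.pyRange_one_eq_nil le_rfl]
    simp [pvMark]
  | succ m ih =>
    intro k acc hm hk
    have hklt : k < l.length := by omega
    rw [PySem.List.pyRange_one_cons (by exact_mod_cast hklt)]
    -- identify the pieces read by the step
    have hcur : PySem.List.pyGetD l (k : Int) ' ' = l[k] := by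
      rw [PySem.List.pyGetD_natCast, List.getD_eq_getElem l ' ' hklt]
    have hlast : (if (k : Int) = 0 then false
        else PySem.Chars.isupper (PySem.List.pyGetD l ((k : Int) - 1) ' ')) = pvPrevAt l k := by
      cases k with
      | zero => simp [pvPrevAt]
      | succ j =>
        have h1 : ((j + 1 : Nat) : Int) - 1 = (j : Int) := by push_cast; ring
        rw [if_neg (by exact_mod_cast Nat.succ_ne_zero j), h1, PySem.List.pyGetD_natCast]
        rfl
    have hnext : (decide ((k : Int) < (l.length : Int) - 1) &&
        PySem.Chars.isupper (PySem.List.pyGetD l ((k : Int) + 1) ' '))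
        = pvNextUpper (l.drop (k + 1)) := by
      by_cases hk1 : k + 1 < l.length
      · have h1 : ((k : Int) + 1) = ((k + 1 : Nat) : Int) := by push_cast; ring
        rw [h1, PySem.List.pyGetD_natCast, List.getD_eq_getElem l ' ' hk1,
            List.drop_eq_getElem_cons hk1]
        simp [pvNextUpper]
        omega
      · have hdrop : l.drop (k + 1) = [] := List.drop_eq_nil_of_le (by omega)
        rw [hdrop]
        simp [pvNextUpper]
        omega
    -- the step rewrites the state to the (k+1)-state for the extended prefix acc'
    have hdropk : l.drop k = l[k] :: l.drop (k + 1) := List.drop_eq_getElem_cons hklt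
    have hins : ∀ ch : Char,
        PySem.List.insert (acc ++ l.drop k) ((k : Int) + ((acc.length : Int) - (k : Int))) ch
          = acc ++ ch :: l.drop k := by
      intro ch
      have h1 : (k : Int) + ((acc.length : Int) - (k : Int)) = ((acc.length : Nat) : Int) := by ring
      rw [h1, PySem.List.insert_natCast _ _ _ (by simp)]
      simp
    have hstep : pvStepA l (acc ++ l.drop k, (acc.length : Int) - (k : Int)) (k : Int)
        = (((acc ++ (if PySem.Chars.isupper l[k] && !pvPrevAt l k then
              (if pvNextUpper (l.drop (k + 1)) then ['η'] else ['ζ']) else []) ++ [l[k]]))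
            ++ l.drop (k + 1),
           ((acc ++ (if PySem.Chars.isupper l[k] && !pvPrevAt l k then
              (if pvNextUpper (l.drop (k + 1)) then ['η'] else ['ζ']) else []) ++ [l[k]]).length : Int)
             - ((k : Int) + 1)) := by
      unfold pvStepA
      simp only [hcur, hlast, hnext, hins]
      cases hu : PySem.Chars.isupper l[k] <;>
        cases hp : pvPrevAt l k <;>
          cases hnu : pvNextUpper (List.drop (k + 1) l) <;>
            (rw [hdropk]; simp [Prod.ext_iff]) <;> omega
    rw [List.foldl_cons, hstep]
    have hk1 : ((k : Int) + 1) = ((k + 1 : Nat) : Int) := by push_cast; ring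
    rw [hk1]
    rw [ih (k + 1) _ (by omega) (by omega)]
    have hprev1 : pvPrevAt l (k + 1) = PySem.Chars.isupper l[k] := by
      show PySem.Chars.isupper (l.getD k ' ') = _
      rw [List.getD_eq_getElem l ' ' hklt]
    rw [hprev1, hdropk, pvMark]
    simp

-- ===== VERDICT (by name: the statement is the Claim_ definition above) =====
theorem find_caps_spec : Claim_equal_find_caps := by
  intro segment _
  unfold Spec_find_caps find_caps find_caps_alt
  have hA : ((PySem.List.pyRange 0 (segment.toList.length : Int) 1).foldl
      (pvStepA segment.toList) (segment.toList, 0)).1 = pvMark false segment.toList := by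
    have h := loopA segment.toList segment.toList.length 0 [] (by omega) (by omega)
    simpa [pvPrevAt] using h
  have hB : ((pvRuns segment.toList).foldl
      (fun (acc : List (List Char)) g =>
        acc ++ [if g.1 then (if 2 ≤ g.2.length then 'η' :: g.2 else 'ζ' :: g.2) else g.2])
      []).flatten = pvMark false segment.toList := by
    rw [PySem.List.foldl_append_singleton_eq_map, List.nil_append, ← List.flatMap_def]
    exact runs_flat segment.toList.length segment.toList le_rfl false (by simp)
  simp only [hA, hB]
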